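-- pv_equiv track=rewrite | github.com/umoqnier/cl-2026-2-lab | notebooks/1_niveles_linguisticos.py | prettify_tags
-- ===== SOURCE A (Python) =====
-- def prettify_tags(word: str) -> str:
--     tags = {
--         "DIM": "[b yellow]DIM[/]",
--         "FEM": "[b green]FEM[/]",
--         "MSC": "[b magenta]MSC[/]",
--         "PL": "[b blue]PL[/]",
--     }
--     for tag, pretty_tag in tags.items():
--         word = word.replace(tag, pretty_tag)
--     return word
-- ===== SOURCE B (Python) =====
-- def prettify_tags(word: str) -> str:
--     pairs = (
--         ("DIM", "[b yellow]DIM[/]"),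
--         ("FEM", "[b green]FEM[/]"),
--         ("MSC", "[b magenta]MSC[/]"),
--         ("PL", "[b blue]PL[/]"),
--     )
--     out = []
--     i = 0
--     n = len(word)
--     while i < n:
--         for tag, pretty in pairs:
--             if word.startswith(tag, i):
--                 out.append(pretty)
--                 i += len(tag)
--                 break
--         else:
--             out.append(word[i])
--             i += 1
--     return "".join(out)
-- ===== Notes on version B (the rewrite author's own statement) =====
-- stated objective: alternative
-- what changed: B replaces A's four sequential full-string replace passes by a single left-to-right scan that matches any of the four tags at each position and emits either the styled markup or the character, joining the pieces once.
import Mathlib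
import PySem

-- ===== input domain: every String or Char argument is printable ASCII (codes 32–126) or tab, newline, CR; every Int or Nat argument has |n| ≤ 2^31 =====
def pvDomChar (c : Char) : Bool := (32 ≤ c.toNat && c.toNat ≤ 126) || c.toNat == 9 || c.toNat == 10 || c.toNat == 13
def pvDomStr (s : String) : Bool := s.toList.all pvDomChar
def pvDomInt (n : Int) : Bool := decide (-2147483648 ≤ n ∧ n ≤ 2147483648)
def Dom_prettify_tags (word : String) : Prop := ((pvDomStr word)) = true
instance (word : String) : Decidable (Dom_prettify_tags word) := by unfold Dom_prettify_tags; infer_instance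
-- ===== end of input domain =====

-- B replaces A's four sequential full-string replace passes by one left-to-right scan that
-- matches any tag at each position (alternative decomposition; no speed claim).

-- ===== PORT A =====
-- Literal port: build the tag dict, then loop over its items replacing each tag in the word.
def prettify_tags (word : String) : String :=
  let tags : PySem.Dict String String :=
    ((((PySem.Dict.empty).insert "DIM" "[b yellow]DIM[/]").insert "FEM" "[b green]FEM[/]").insert
        "MSC" "[b magenta]MSC[/]").insert "PL" "[b blue]PL[/]"
  tags.items.foldl (fun w p => PySem.Str.replace w p.1 p.2) word

-- ===== PORT B =====
-- the four markup strings, as char lists: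
-- "[b yellow]DIM[/]", "[b green]FEM[/]", "[b magenta]MSC[/]", "[b blue]PL[/]"
def pvR1 : List Char := ['[', 'b', ' ', 'y', 'e', 'l', 'l', 'o', 'w', ']', 'D', 'I', 'M', '[', '/', ']']
def pvR2 : List Char := ['[', 'b', ' ', 'g', 'r', 'e', 'e', 'n', ']', 'F', 'E', 'M', '[', '/', ']']
def pvR3 : List Char := ['[', 'b', ' ', 'm', 'a', 'g', 'e', 'n', 't', 'a', ']', 'M', 'S', 'C', '[', '/', ']']
def pvR4 : List Char := ['[', 'b', ' ', 'b', 'l', 'u', 'e', ']', 'P', 'L', '[', '/', ']']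

-- B's single scan: at each position try the tags in order (word.startswith(tag, i)),
-- emitting the markup and skipping the tag, else copying the character.
def scanB : List Char → List Char
  | [] => []
  | c :: t =>
    if List.isPrefixOf ['D', 'I', 'M'] (c :: t) then pvR1 ++ scanB ((c :: t).drop 3)
    else if List.isPrefixOf ['F', 'E', 'M'] (c :: t) then pvR2 ++ scanB ((c :: t).drop 3)
    else if List.isPrefixOf ['M', 'S', 'C'] (c :: t) then pvR3 ++ scanB ((c :: t).drop 3)
    else if List.isPrefixOf ['P', 'L'] (c :: t) then pvR4 ++ scanB ((c :: t).drop 2)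
    else c :: scanB t
termination_by l => l.length
decreasing_by all_goals (simp; try omega)

def prettify_tags_alt (word : String) : String := String.ofList (scanB word.toList)

-- ===== PRECONDITION & SPEC =====
def Spec_prettify_tags (word : String) (out : String) : Prop := out = prettify_tags_alt word
instance (word : String) (out : String) : Decidable (Spec_prettify_tags word out) := by unfold Spec_prettify_tags; infer_instance

-- ===== CLAIM (what is proved, stated in full; the proofs are below) =====
def Claim_equal_prettify_tags : Prop := ∀ (word : String), Dom_prettify_tags word → Spec_prettify_tags word (prettify_tags word)

-- ===== LEMMAS AND PROOFS =====

-- clean recursion equivalent to Python's str.replace (for a nonempty pattern)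
def repl (old nw : List Char) : List Char → List Char
  | [] => []
  | c :: t =>
    if h : old ≠ [] ∧ List.isPrefixOf old (c :: t) then
      nw ++ repl old nw ((c :: t).drop old.length)
    else c :: repl old nw t
termination_by l => l.length
decreasing_by
  all_goals simp
  have : 0 < old.length := List.length_pos_iff.mpr h.1
  omega

theorem repl_nil (old nw : List Char) : repl old nw [] = [] := by simp [repl]

theorem repl_pos (old nw : List Char) (c : Char) (t : List Char)
    (h1 : old ≠ []) (h2 : List.isPrefixOf old (c :: t) = true) :
    repl old nw (c :: t) = nw ++ repl old nw ((c :: t).drop old.length) := by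
  rw [repl]; simp [h1, h2]

theorem repl_neg (old nw : List Char) (c : Char) (t : List Char)
    (h2 : List.isPrefixOf old (c :: t) = false) :
    repl old nw (c :: t) = c :: repl old nw t := by
  rw [repl]; simp [h2]

theorem repl_cons (old nw : List Char) (c : Char) (t : List Char) :
    repl old nw (c :: t) =
      if (old.isPrefixOf (c :: t) && !old.isEmpty) then nw ++ repl old nw ((c :: t).drop old.length)
      else c :: repl old nw t := by
  by_cases h1 : old = []
  · subst h1; rw [repl]; simp
  · by_cases h2 : old.isPrefixOf (c :: t) = true
    · simp [h2, List.isEmpty_eq_false_iff.mpr h1, repl_pos old nw c t h1 h2]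
    · simp [eq_false_of_ne_true h2, repl_neg old nw c t (eq_false_of_ne_true h2)]

-- the accumulator of PySem's replace.go only prepends
theorem go0 (old nw l acc : List Char) : PySem.Chars.replace.go old nw 0 l acc = acc.reverse ++ l := by
  rw [PySem.Chars.replace.go]

theorem goNil (old nw acc : List Char) (fuel : Nat) :
    PySem.Chars.replace.go old nw (fuel + 1) [] acc = acc.reverse := by
  rw [PySem.Chars.replace.go]; omega

theorem goCons (old nw acc : List Char) (fuel : Nat) (c : Char) (t : List Char) :
    PySem.Chars.replace.go old nw (fuel + 1) (c :: t) acc =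
      if old.isPrefixOf (c :: t) then
        PySem.Chars.replace.go old nw fuel ((c :: t).drop old.length) (nw.reverse ++ acc)
      else PySem.Chars.replace.go old nw fuel t (c :: acc) := by
  rw [PySem.Chars.replace.go]

theorem go_acc (old nw : List Char) : ∀ (fuel : Nat) (l acc : List Char),
    PySem.Chars.replace.go old nw fuel l acc = acc.reverse ++ PySem.Chars.replace.go old nw fuel l [] := by
  intro fuel
  induction fuel with
  | zero => intro l acc; rw [go0, go0]; simp
  | succ n ih =>
    intro l acc
    cases l with
    | nil => rw [goNil, goNil]; simp
    | cons c t =>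
      rw [goCons, goCons]
      by_cases h : old.isPrefixOf (c :: t) = true
      · simp only [h, if_pos]
        rw [ih _ (nw.reverse ++ acc), ih _ (nw.reverse ++ [])]
        simp
      · simp only [eq_false_of_ne_true h, Bool.false_eq_true, if_neg, not_false_iff]
        rw [ih t (c :: acc), ih t [c]]
        simp

-- enough fuel makes replace.go equal to repl
theorem go_eq_repl (old nw : List Char) (h : old ≠ []) : ∀ (fuel : Nat) (l : List Char),
    l.length ≤ fuel → PySem.Chars.replace.go old nw fuel l [] = repl old nw l := by
  intro fuel
  induction fuel with
  | zero =>
    intro l hl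
    have hnil : l = [] := by cases l <;> simp_all
    subst hnil; rw [go0, repl_nil]; simp
  | succ n ih =>
    intro l hl
    cases l with
    | nil => rw [goNil, repl_nil]; simp
    | cons c t =>
      rw [goCons]
      by_cases hp : old.isPrefixOf (c :: t) = true
      · simp only [hp, if_pos]
        rw [go_acc, ih _ (by
          have : 0 < old.length := List.length_pos_iff.mpr h
          simp at hl ⊢; omega)]
        rw [repl_pos old nw c t h hp]; simp
      · simp only [eq_false_of_ne_true hp, Bool.false_eq_true, if_neg, not_false_iff]
        rw [go_acc, ih t (by simp at hl; omega)]
        rw [repl_neg old nw c t (eq_false_of_ne_true hp)]; simp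

theorem replace_eq_repl (s old nw : List Char) (h : old ≠ []) :
    PySem.Chars.replace s old nw = repl old nw s := by
  unfold PySem.Chars.replace
  have he : old.isEmpty = false := by cases old <;> simp_all
  rw [he]
  simp [go_eq_repl old nw h s.length s le_rfl]

-- decomposing a prefix test
theorem prefix_cons_iff (a : Char) (as : List Char) (b : Char) (l : List Char) :
    (a :: as).isPrefixOf (b :: l) = true ↔ a = b ∧ as.isPrefixOf l = true := by
  simp [List.isPrefixOf]

theorem singleton_prefix (a : Char) (l : List Char) :
    [a].isPrefixOf l = true ↔ l.head? = some a := by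
  cases l with
  | nil => simp [List.isPrefixOf]
  | cons b t => simp [List.isPrefixOf]; exact eq_comm

-- a replace pass whose replacement starts with '[' cannot create a first char ≠ '['
theorem one_stable (a : Char) (ha : a ≠ '[') (old nw : List Char) (hnw : nw.head? = some '[')
    (l : List Char) (h : l.head? ≠ some a) : (repl old nw l).head? ≠ some a := by
  cases l with
  | nil => rw [repl_nil]; simp
  | cons c t =>
    rw [repl_cons]
    split
    · cases nw with
      | nil => simp at hnw
      | cons x w => simp at hnw; simp [hnw]; exact fun hx => ha hx.symm
    · simpa using h

-- "EM" cannot appear at the front of a DIM-replace output unless it was there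
theorem em_stable (t : List Char) (h : List.isPrefixOf ['E', 'M'] t = false) :
    List.isPrefixOf ['E', 'M'] (repl ['D', 'I', 'M'] pvR1 t) = false := by
  cases t with
  | nil => rw [repl_nil]; simp [List.isPrefixOf]
  | cons d u =>
    by_cases hdim : List.isPrefixOf ['D', 'I', 'M'] (d :: u) = true
    · rw [repl_pos _ _ _ _ (by decide) hdim]
      simp [pvR1, List.isPrefixOf]
    · rw [repl_neg _ _ _ _ (eq_false_of_ne_true hdim)]
      by_cases hE : 'E' = d
      · subst hE
        have hu : ['M'].isPrefixOf u = false := by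
          by_contra hc
          rw [Bool.not_eq_false] at hc
          have : List.isPrefixOf ['E', 'M'] ('E' :: u) = true := (prefix_cons_iff _ _ _ _).mpr ⟨rfl, hc⟩
          rw [h] at this; exact Bool.false_ne_true this
        have hh : (repl ['D', 'I', 'M'] pvR1 u).head? ≠ some 'M' :=
          one_stable 'M' (by decide) _ _ (by simp [pvR1]) u
            (fun hc => Bool.false_ne_true (hu ▸ ((singleton_prefix 'M' u).mpr hc)))
        by_contra hc
        rw [Bool.not_eq_false] at hc
        have h2 := ((prefix_cons_iff _ _ _ _).mp hc).2
        exact hh ((singleton_prefix _ _).mp h2)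
      · by_contra hc
        rw [Bool.not_eq_false] at hc
        exact hE ((prefix_cons_iff _ _ _ _).mp hc).1

-- "SC" cannot appear at the front after the DIM and FEM passes unless it was there
theorem sc_stable (t : List Char) (h : List.isPrefixOf ['S', 'C'] t = false) :
    List.isPrefixOf ['S', 'C'] (repl ['F', 'E', 'M'] pvR2 (repl ['D', 'I', 'M'] pvR1 t)) = false := by
  cases t with
  | nil => rw [repl_nil, repl_nil]; simp [List.isPrefixOf]
  | cons d u =>
    by_cases hdim : List.isPrefixOf ['D', 'I', 'M'] (d :: u) = true
    · rw [repl_pos _ _ _ _ (by decide) hdim]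
      simp only [pvR1, List.cons_append]
      rw [repl_neg _ _ _ _ (by simp [List.isPrefixOf])]
      simp [List.isPrefixOf]
    · rw [repl_neg _ _ _ _ (eq_false_of_ne_true hdim)]
      by_cases hfem : List.isPrefixOf ['F', 'E', 'M'] (d :: repl ['D', 'I', 'M'] pvR1 u) = true
      · rw [repl_pos _ _ _ _ (by decide) hfem]
        simp [pvR2, List.isPrefixOf]
      · rw [repl_neg _ _ _ _ (eq_false_of_ne_true hfem)]
        by_cases hS : 'S' = d
        · subst hS
          have hu : ['C'].isPrefixOf u = false := by
            by_contra hc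
            rw [Bool.not_eq_false] at hc
            have : List.isPrefixOf ['S', 'C'] ('S' :: u) = true := (prefix_cons_iff _ _ _ _).mpr ⟨rfl, hc⟩
            rw [h] at this; exact Bool.false_ne_true this
          have hu' : u.head? ≠ some 'C' :=
            fun hc => Bool.false_ne_true (hu ▸ ((singleton_prefix 'C' u).mpr hc))
          have hh : (repl ['F', 'E', 'M'] pvR2 (repl ['D', 'I', 'M'] pvR1 u)).head? ≠ some 'C' :=
            one_stable 'C' (by decide) _ _ (by simp [pvR2]) _
              (one_stable 'C' (by decide) _ _ (by simp [pvR1]) u hu')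
          by_contra hc
          rw [Bool.not_eq_false] at hc
          exact hh ((singleton_prefix _ _).mp ((prefix_cons_iff _ _ _ _).mp hc).2)
        · by_contra hc
          rw [Bool.not_eq_false] at hc
          exact hS ((prefix_cons_iff _ _ _ _).mp hc).1

-- "L" cannot appear at the front after the DIM, FEM and MSC passes unless it was there
theorem l_stable (t : List Char) (h : List.isPrefixOf ['L'] t = false) :
    List.isPrefixOf ['L'] (repl ['M', 'S', 'C'] pvR3 (repl ['F', 'E', 'M'] pvR2 (repl ['D', 'I', 'M'] pvR1 t))) = false := by
  have ht : t.head? ≠ some 'L' :=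
    fun hc => Bool.false_ne_true (h ▸ ((singleton_prefix 'L' t).mpr hc))
  have hh : (repl ['M', 'S', 'C'] pvR3 (repl ['F', 'E', 'M'] pvR2 (repl ['D', 'I', 'M'] pvR1 t))).head? ≠ some 'L' :=
    one_stable 'L' (by decide) _ _ (by simp [pvR3]) _
      (one_stable 'L' (by decide) _ _ (by simp [pvR2]) _
        (one_stable 'L' (by decide) _ _ (by simp [pvR1]) t ht))
  by_contra hc
  rw [Bool.not_eq_false] at hc
  exact hh ((singleton_prefix _ _).mp hc)

-- MAIN: the four sequential replace passes equal the single scan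
theorem chain_eq_scanB : ∀ (v : List Char),
    repl ['P', 'L'] pvR4 (repl ['M', 'S', 'C'] pvR3 (repl ['F', 'E', 'M'] pvR2 (repl ['D', 'I', 'M'] pvR1 v))) = scanB v := by
  have key : ∀ (n : Nat) (v : List Char), v.length ≤ n →
      repl ['P', 'L'] pvR4 (repl ['M', 'S', 'C'] pvR3 (repl ['F', 'E', 'M'] pvR2 (repl ['D', 'I', 'M'] pvR1 v))) = scanB v := by
    intro n
    induction n with
    | zero =>
      intro v hv
      have hnil : v = [] := by cases v <;> simp_all
      subst hnil
      simp [repl_nil, scanB]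
    | succ n ih =>
      intro v hv
      cases v with
      | nil => simp [repl_nil, scanB]
      | cons c t =>
        by_cases hd : List.isPrefixOf ['D', 'I', 'M'] (c :: t) = true
        · obtain ⟨v', hv'⟩ := List.isPrefixOf_iff_prefix.mp hd
          have hlen : v'.length ≤ n := by
            have := congrArg List.length hv'
            simp at this hv; omega
          have ihv := ih v' hlen
          rw [← hv']
          simp [repl_cons, List.isPrefixOf, pvR1, pvR2, pvR3, pvR4, scanB]
          simpa [pvR1, pvR2, pvR3, pvR4] using ihv
        · by_cases hf : List.isPrefixOf ['F', 'E', 'M'] (c :: t) = true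
          · obtain ⟨v', hv'⟩ := List.isPrefixOf_iff_prefix.mp hf
            have hlen : v'.length ≤ n := by
              have := congrArg List.length hv'
              simp at this hv; omega
            have ihv := ih v' hlen
            rw [← hv']
            simp [repl_cons, List.isPrefixOf, pvR1, pvR2, pvR3, pvR4, scanB]
            simpa [pvR1, pvR2, pvR3, pvR4] using ihv
          · by_cases hm : List.isPrefixOf ['M', 'S', 'C'] (c :: t) = true
            · obtain ⟨v', hv'⟩ := List.isPrefixOf_iff_prefix.mp hm
              have hlen : v'.length ≤ n := by
                have := congrArg List.length hv'
                simp at this hv; omega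
              have ihv := ih v' hlen
              rw [← hv']
              simp [repl_cons, List.isPrefixOf, pvR1, pvR2, pvR3, pvR4, scanB]
              simpa [pvR1, pvR2, pvR3, pvR4] using ihv
            · by_cases hp : List.isPrefixOf ['P', 'L'] (c :: t) = true
              · obtain ⟨v', hv'⟩ := List.isPrefixOf_iff_prefix.mp hp
                have hlen : v'.length ≤ n := by
                  have := congrArg List.length hv'
                  simp at this hv; omega
                have ihv := ih v' hlen
                rw [← hv']
                simp [repl_cons, List.isPrefixOf, pvR1, pvR2, pvR3, pvR4, scanB]
                simpa [pvR1, pvR2, pvR3, pvR4] using ihv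
              · -- no tag matches at this position
                have hd' := eq_false_of_ne_true hd
                have hf' := eq_false_of_ne_true hf
                have hm' := eq_false_of_ne_true hm
                have hp' := eq_false_of_ne_true hp
                rw [repl_neg _ _ _ _ hd']
                have hf2 : List.isPrefixOf ['F', 'E', 'M'] (c :: repl ['D', 'I', 'M'] pvR1 t) = false := by
                  by_contra hc
                  rw [Bool.not_eq_false] at hc
                  obtain ⟨hc1, hc2⟩ := (prefix_cons_iff _ _ _ _).mp hc
                  subst hc1
                  have hEM : List.isPrefixOf ['E', 'M'] t = false := by
                    by_contra hc3
                    rw [Bool.not_eq_false] at hc3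
                    exact Bool.false_ne_true (hf' ▸ (prefix_cons_iff _ _ _ _).mpr ⟨rfl, hc3⟩)
                  exact Bool.false_ne_true ((em_stable t hEM) ▸ hc2)
                rw [repl_neg _ _ _ _ hf2]
                have hm2 : List.isPrefixOf ['M', 'S', 'C']
                    (c :: repl ['F', 'E', 'M'] pvR2 (repl ['D', 'I', 'M'] pvR1 t)) = false := by
                  by_contra hc
                  rw [Bool.not_eq_false] at hc
                  obtain ⟨hc1, hc2⟩ := (prefix_cons_iff _ _ _ _).mp hc
                  subst hc1
                  have hSC : List.isPrefixOf ['S', 'C'] t = false := by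
                    by_contra hc3
                    rw [Bool.not_eq_false] at hc3
                    exact Bool.false_ne_true (hm' ▸ (prefix_cons_iff _ _ _ _).mpr ⟨rfl, hc3⟩)
                  exact Bool.false_ne_true ((sc_stable t hSC) ▸ hc2)
                rw [repl_neg _ _ _ _ hm2]
                have hp2 : List.isPrefixOf ['P', 'L']
                    (c :: repl ['M', 'S', 'C'] pvR3 (repl ['F', 'E', 'M'] pvR2 (repl ['D', 'I', 'M'] pvR1 t))) = false := by
                  by_contra hc
                  rw [Bool.not_eq_false] at hc
                  obtain ⟨hc1, hc2⟩ := (prefix_cons_iff _ _ _ _).mp hc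
                  subst hc1
                  have hL : List.isPrefixOf ['L'] t = false := by
                    by_contra hc3
                    rw [Bool.not_eq_false] at hc3
                    exact Bool.false_ne_true (hp' ▸ (prefix_cons_iff _ _ _ _).mpr ⟨rfl, hc3⟩)
                  exact Bool.false_ne_true ((l_stable t hL) ▸ hc2)
                rw [repl_neg _ _ _ _ hp2]
                rw [scanB]
                simp only [hd', hf', hm', hp', Bool.false_eq_true, if_neg, not_false_iff]
                have hlen : t.length ≤ n := by simp at hv; omega
                rw [ih t hlen]
  intro v
  exact key v.length v le_rfl

theorem prettify_tags_eq_chain (word : String) :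
    prettify_tags word = String.ofList
      (repl ['P', 'L'] pvR4 (repl ['M', 'S', 'C'] pvR3 (repl ['F', 'E', 'M'] pvR2 (repl ['D', 'I', 'M'] pvR1 word.toList)))) := by
  unfold prettify_tags
  have hitems : (((((PySem.Dict.empty : PySem.Dict String String).insert "DIM" "[b yellow]DIM[/]").insert "FEM" "[b green]FEM[/]").insert
        "MSC" "[b magenta]MSC[/]").insert "PL" "[b blue]PL[/]").items
      = [("DIM", "[b yellow]DIM[/]"), ("FEM", "[b green]FEM[/]"), ("MSC", "[b magenta]MSC[/]"), ("PL", "[b blue]PL[/]")] := by decide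
  simp only [hitems]
  simp only [List.foldl_cons, List.foldl_nil]
  simp only [PySem.Str.replace, String.toList_ofList]
  rw [replace_eq_repl _ _ _ (by decide), replace_eq_repl _ _ _ (by decide),
      replace_eq_repl _ _ _ (by decide), replace_eq_repl _ _ _ (by decide)]
  have t1 : "DIM".toList = ['D', 'I', 'M'] := by decide
  have t2 : "FEM".toList = ['F', 'E', 'M'] := by decide
  have t3 : "MSC".toList = ['M', 'S', 'C'] := by decide
  have t4 : "PL".toList = ['P', 'L'] := by decide
  have r1 : "[b yellow]DIM[/]".toList = pvR1 := by decide
  have r2 : "[b green]FEM[/]".toList = pvR2 := by decide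
  have r3 : "[b magenta]MSC[/]".toList = pvR3 := by decide
  have r4 : "[b blue]PL[/]".toList = pvR4 := by decide
  rw [t1, t2, t3, t4, r1, r2, r3, r4]

-- ===== VERDICT (by name: the statement is the Claim_ definition above) =====
theorem prettify_tags_spec : Claim_equal_prettify_tags := by
  intro word _
  unfold Spec_prettify_tags prettify_tags_alt
  rw [prettify_tags_eq_chain, chain_eq_scanB]
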